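-- pv_equiv track=rewrite | github.com/saulspatz/maverick | scripts/test7666.py | hasFull
-- ===== SOURCE A (Python) =====
-- from itertools import combinations
--
-- def hasFull(spades, hearts, diamonds, clubs):
--     for s in combinations(spades, 2):
--         for h in combinations(hearts, 1):
--             for d in combinations(diamonds, 1):
--                 for c in combinations(clubs, 1):
--                     hand = s + h + d + c
--                     ranks = len(set(hand))
--                     if ranks == 2:
--                         m = hand.count(hand[0])
--                         if m in (2,3): return 1
--     return 0
-- ===== SOURCE B (Python) =====
-- def hasFull(spades, hearts, diamonds, clubs):
--     # Enumerate candidate (triple rank x, pair rank y) instead of card combinations.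
--     sp = set(spades)
--     he = set(hearts)
--     di = set(diamonds)
--     cl = set(clubs)
--     sp2 = {r for r in sp if spades.count(r) >= 2}
--     ranks = sp | he | di | cl
--     for x in ranks:
--         for y in ranks:
--             if x == y:
--                 continue
--             # (a) spades supply x,x; one of h/d/c supplies the third x, other two supply y,y
--             if x in sp2 and ((x in he and y in di and y in cl) or
--                              (y in he and x in di and y in cl) or
--                              (y in he and y in di and x in cl)):
--                 return 1
--             # (b) spades supply x,y; two of h/d/c supply x, the remaining one supplies y
--             if x in sp and y in sp and ((y in he and x in di and x in cl) or
--                                         (x in he and y in di and x in cl) or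
--                                         (x in he and x in di and y in cl)):
--                 return 1
--             # (c) spades supply y,y; all of h/d/c supply x
--             if y in sp2 and x in he and x in di and x in cl:
--                 return 1
--     return 0
-- ===== Notes on version B (the rewrite author's own statement) =====
-- stated objective: faster
-- what changed: B enumerates candidate (triple-rank, pair-rank) pairs over the distinct ranks present and tests per-suit availability (with spade multiplicity for the two-same-spade patterns), instead of A's enumeration of all 2-spade/1-heart/1-diamond/1-club card combinations.
import Mathlib
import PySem

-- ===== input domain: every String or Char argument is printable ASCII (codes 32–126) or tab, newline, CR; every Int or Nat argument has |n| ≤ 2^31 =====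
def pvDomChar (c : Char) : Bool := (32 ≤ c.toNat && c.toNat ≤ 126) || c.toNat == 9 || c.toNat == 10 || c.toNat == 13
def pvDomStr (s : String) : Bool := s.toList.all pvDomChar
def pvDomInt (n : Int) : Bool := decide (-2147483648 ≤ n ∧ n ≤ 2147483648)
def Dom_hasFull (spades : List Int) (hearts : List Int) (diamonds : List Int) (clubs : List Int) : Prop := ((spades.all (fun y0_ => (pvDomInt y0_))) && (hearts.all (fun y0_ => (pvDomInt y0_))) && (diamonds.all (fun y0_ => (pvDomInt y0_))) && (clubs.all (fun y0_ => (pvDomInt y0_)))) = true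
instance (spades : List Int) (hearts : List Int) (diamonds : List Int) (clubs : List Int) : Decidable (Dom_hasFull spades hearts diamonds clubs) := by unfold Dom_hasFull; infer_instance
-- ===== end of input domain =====

-- B replaces A's enumeration of all 2-spade/1-heart/1-diamond/1-club card combinations by an
-- enumeration of candidate (triple-rank, pair-rank) pairs with per-suit availability tests (faster).

-- ===== PORT A =====
-- combinations(xs, 2): all pairs (xs[i], xs[j]) with i < j, in order
def pvPairs (xs : List Int) : List (Int × Int) :=
  match xs with
  | [] => []
  | x :: rest => (rest.map (fun y => (x, y))) ++ pvPairs rest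

-- the body of A's innermost loop: hand = s + h + d + c; len(set(hand)) == 2 and hand.count(hand[0]) in (2,3)
def pvCheck (s1 s2 h d c : Int) : Bool :=
  let hand : List Int := [s1, s2, h, d, c]
  let ranks := (PySem.Set.ofList hand).length
  if ranks = 2 then
    let m := hand.count (hand.headD 0)
    m == 2 || m == 3
  else false

def hasFull (spades : List Int) (hearts : List Int) (diamonds : List Int) (clubs : List Int) : Int :=
  if (pvPairs spades).any (fun s =>
       hearts.any (fun h =>
         diamonds.any (fun d =>
           clubs.any (fun c => pvCheck s.1 s.2 h d c)))) then 1 else 0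

-- ===== PORT B =====
def hasFull_alt (spades : List Int) (hearts : List Int) (diamonds : List Int) (clubs : List Int) : Int :=
  let sp : PySem.Set Int := PySem.Set.ofList spades
  let he : PySem.Set Int := PySem.Set.ofList hearts
  let di : PySem.Set Int := PySem.Set.ofList diamonds
  let cl : PySem.Set Int := PySem.Set.ofList clubs
  let sp2 : PySem.Set Int := sp.filter (fun r => decide (2 ≤ spades.count r))
  let ranks : PySem.Set Int := PySem.Set.union (PySem.Set.union (PySem.Set.union sp he) di) cl
  if ranks.any (fun x => ranks.any (fun y =>
       if x == y then false
       else
         (PySem.Set.contains sp2 x &&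
           ((PySem.Set.contains he x && PySem.Set.contains di y && PySem.Set.contains cl y) ||
            (PySem.Set.contains he y && PySem.Set.contains di x && PySem.Set.contains cl y) ||
            (PySem.Set.contains he y && PySem.Set.contains di y && PySem.Set.contains cl x))) ||
         (PySem.Set.contains sp x && PySem.Set.contains sp y &&
           ((PySem.Set.contains he y && PySem.Set.contains di x && PySem.Set.contains cl x) ||
            (PySem.Set.contains he x && PySem.Set.contains di y && PySem.Set.contains cl x) ||
            (PySem.Set.contains he x && PySem.Set.contains di x && PySem.Set.contains cl y))) ||
         (PySem.Set.contains sp2 y && PySem.Set.contains he x && PySem.Set.contains di x && PySem.Set.contains cl x)))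
  then 1 else 0

-- ===== PRECONDITION & SPEC =====
def Spec_hasFull (spades : List Int) (hearts : List Int) (diamonds : List Int) (clubs : List Int) (out : Int) : Prop := out = hasFull_alt spades hearts diamonds clubs
instance (spades : List Int) (hearts : List Int) (diamonds : List Int) (clubs : List Int) (out : Int) : Decidable (Spec_hasFull spades hearts diamonds clubs out) := by unfold Spec_hasFull; infer_instance

-- ===== CLAIM (what is proved, stated in full; the proofs are below) =====
def Claim_equal_hasFull : Prop := ∀ (spades : List Int) (hearts : List Int) (diamonds : List Int) (clubs : List Int), Dom_hasFull spades hearts diamonds clubs → Spec_hasFull spades hearts diamonds clubs (hasFull spades hearts diamonds clubs)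

-- ===== LEMMAS AND PROOFS =====

-- the common propositional core: ranks x (triple) and y (pair) are realisable from the suits
def pvGood (spades hearts diamonds clubs : List Int) (x y : Int) : Prop :=
  x ≠ y ∧
  ((2 ≤ spades.count x ∧ ((x ∈ hearts ∧ y ∈ diamonds ∧ y ∈ clubs) ∨ (y ∈ hearts ∧ x ∈ diamonds ∧ y ∈ clubs) ∨ (y ∈ hearts ∧ y ∈ diamonds ∧ x ∈ clubs))) ∨
   (x ∈ spades ∧ y ∈ spades ∧ ((y ∈ hearts ∧ x ∈ diamonds ∧ x ∈ clubs) ∨ (x ∈ hearts ∧ y ∈ diamonds ∧ x ∈ clubs) ∨ (x ∈ hearts ∧ x ∈ diamonds ∧ y ∈ clubs))) ∨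
   (2 ≤ spades.count y ∧ x ∈ hearts ∧ x ∈ diamonds ∧ x ∈ clubs))

-- ---- pvPairs facts ----
lemma pvPairs_mem_both {a b : Int} {xs : List Int} (h : (a, b) ∈ pvPairs xs) : a ∈ xs ∧ b ∈ xs := by
  induction xs with
  | nil => simp [pvPairs] at h
  | cons x rest ih =>
    simp only [pvPairs, List.mem_append, List.mem_map] at h
    rcases h with ⟨y, hy, he⟩ | h
    · cases he; exact ⟨List.mem_cons_self, List.mem_cons_of_mem _ hy⟩
    · rcases ih h with ⟨ha, hb⟩; exact ⟨List.mem_cons_of_mem _ ha, List.mem_cons_of_mem _ hb⟩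

lemma pvPairs_count_two {a : Int} {xs : List Int} (h : (a, a) ∈ pvPairs xs) : 2 ≤ xs.count a := by
  induction xs with
  | nil => simp [pvPairs] at h
  | cons x rest ih =>
    simp only [pvPairs, List.mem_append, List.mem_map] at h
    rcases h with ⟨y, hy, he⟩ | h
    · injection he with h1 h2
      subst h1; subst h2
      have : 1 ≤ rest.count y := List.count_pos_iff.2 hy
      simp [List.count_cons]
      omega
    · have := ih h
      simp [List.count_cons]
      omega

lemma pvPairs_of_count_two {a : Int} {xs : List Int} (h : 2 ≤ xs.count a) : (a, a) ∈ pvPairs xs := by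
  induction xs with
  | nil => simp at h
  | cons x rest ih =>
    simp only [pvPairs, List.mem_append, List.mem_map]
    by_cases hxa : x = a
    · subst hxa
      left
      have : 1 ≤ rest.count x := by rw [List.count_cons_self] at h; omega
      exact ⟨x, List.count_pos_iff.1 this, rfl⟩
    · right
      apply ih
      simpa [List.count_cons, hxa] using h

lemma pvPairs_of_mem_mem {a b : Int} {xs : List Int} (ha : a ∈ xs) (hb : b ∈ xs) (hne : a ≠ b) :
    (a, b) ∈ pvPairs xs ∨ (b, a) ∈ pvPairs xs := by
  induction xs with
  | nil => simp at ha
  | cons x rest ih =>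
    simp only [pvPairs, List.mem_append, List.mem_map]
    rcases List.mem_cons.1 ha with hxa | ha'
    · subst hxa
      have hb' : b ∈ rest := by
        rcases List.mem_cons.1 hb with h | h
        · exact absurd h.symm hne
        · exact h
      exact Or.inl (Or.inl ⟨b, hb', rfl⟩)
    · rcases List.mem_cons.1 hb with hxb | hb'
      · subst hxb
        exact Or.inr (Or.inl ⟨a, ha', rfl⟩)
      · rcases ih ha' hb' with h | h
        · exact Or.inl (Or.inr h)
        · exact Or.inr (Or.inr h)

-- ---- counting facts ----
lemma pv_counts_three_le (L : List Int) (x y z : Int) (hxy : x ≠ y) (hxz : x ≠ z) (hyz : y ≠ z) :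
    L.count x + L.count y + L.count z ≤ L.length := by
  induction L with
  | nil => simp
  | cons a t ih =>
    by_cases hax : a = x <;> by_cases hay : a = y <;> by_cases haz : a = z <;>
      simp_all [List.count_cons] <;> omega

lemma pv_all_mem_pair {L : List Int} {x y : Int} (hxy : x ≠ y)
    (h3 : L.count x = 3) (h2 : L.count y = 2) (hlen : L.length = 5) :
    ∀ z ∈ L, z = x ∨ z = y := by
  intro z hz
  by_contra hcon
  rw [not_or] at hcon
  obtain ⟨hzx, hzy⟩ := hcon
  have hz1 : 1 ≤ L.count z := List.count_pos_iff.2 hz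
  have := pv_counts_three_le L x y z hxy (Ne.symm hzx) (Ne.symm hzy)
  omega

lemma pv_count_pair_sum {L : List Int} {x y : Int} (hxy : x ≠ y)
    (hall : ∀ z ∈ L, z = x ∨ z = y) : L.count x + L.count y = L.length := by
  induction L with
  | nil => simp
  | cons a t ih =>
    have ha := hall a List.mem_cons_self
    have iht := ih (fun z hz => hall z (List.mem_cons_of_mem _ hz))
    rcases ha with rfl | rfl <;> simp [List.count_cons, hxy, Ne.symm hxy] <;> omega

-- ---- characterisation of A's inner check ----
lemma pvCheck_iff (s1 s2 h d c : Int) :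
    pvCheck s1 s2 h d c = true ↔
      ∃ x y, x ≠ y ∧ ([s1, s2, h, d, c] : List Int).count x = 3 ∧ ([s1, s2, h, d, c] : List Int).count y = 2 := by
  constructor
  · intro hk
    by_cases hr : (PySem.Set.ofList ([s1, s2, h, d, c] : List Int)).length = 2
    · simp only [pvCheck, hr, if_true, List.headD, Bool.or_eq_true, beq_iff_eq] at hk
      obtain ⟨a, b, hab⟩ := List.length_eq_two.1 hr
      have hnd : (PySem.Set.ofList ([s1, s2, h, d, c] : List Int)).Nodup := PySem.Set.nodup_ofList _
      rw [hab] at hnd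
      have hne : a ≠ b := by simpa using hnd
      have hmem : ∀ z : Int, z ∈ ([s1, s2, h, d, c] : List Int) ↔ z = a ∨ z = b := by
        intro z
        rw [← PySem.Set.mem_ofList (xs := ([s1, s2, h, d, c] : List Int)), hab]
        simp
      have hsum : ([s1, s2, h, d, c] : List Int).count a + ([s1, s2, h, d, c] : List Int).count b = 5 := by
        simpa using pv_count_pair_sum hne (fun z hz => (hmem z).1 hz)
      have hs1 : s1 = a ∨ s1 = b := (hmem s1).1 (by simp)
      rcases hs1 with h1 | h1
      · have hca : ([s1, s2, h, d, c] : List Int).count s1 = ([s1, s2, h, d, c] : List Int).count a := by rw [h1]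
        rcases hk with hk | hk
        · exact ⟨b, s1, by rw [h1]; exact hne.symm, by omega, hk⟩
        · exact ⟨s1, b, by rw [h1]; exact hne, hk, by omega⟩
      · have hcb : ([s1, s2, h, d, c] : List Int).count s1 = ([s1, s2, h, d, c] : List Int).count b := by rw [h1]
        rcases hk with hk | hk
        · exact ⟨a, s1, by rw [h1]; exact hne, by omega, hk⟩
        · exact ⟨s1, a, by rw [h1]; exact hne.symm, hk, by omega⟩
    · simp [pvCheck, hr] at hk
  · rintro ⟨x, y, hxy, h3, h2⟩
    have hall := pv_all_mem_pair hxy h3 h2 (by simp)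
    have hx : x ∈ ([s1, s2, h, d, c] : List Int) := List.count_pos_iff.1 (by omega)
    have hy : y ∈ ([s1, s2, h, d, c] : List Int) := List.count_pos_iff.1 (by omega)
    have hmemS : ∀ z : Int, z ∈ PySem.Set.ofList ([s1, s2, h, d, c] : List Int) ↔ z = x ∨ z = y := by
      intro z
      rw [PySem.Set.mem_ofList]
      constructor
      · exact hall z
      · rintro (rfl | rfl)
        · exact hx
        · exact hy
    have hlen2 : (PySem.Set.ofList ([s1, s2, h, d, c] : List Int)).length = 2 := by
      have hnd : (PySem.Set.ofList ([s1, s2, h, d, c] : List Int)).Nodup := PySem.Set.nodup_ofList _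
      have hcard := List.toFinset_card_of_nodup hnd
      have hfs : (PySem.Set.ofList ([s1, s2, h, d, c] : List Int)).toFinset = {x, y} := by
        apply Finset.ext
        intro w
        simp only [List.mem_toFinset, Finset.mem_insert, Finset.mem_singleton]
        exact hmemS w
      rw [← hcard, hfs, Finset.card_pair hxy]
    have hs1 : s1 = x ∨ s1 = y := hall s1 (by simp)
    simp only [pvCheck, hlen2, if_true, List.headD, Bool.or_eq_true, beq_iff_eq]
    rcases hs1 with hh | hh
    · right; rw [hh] at h3 ⊢; exact h3
    · left; rw [hh] at h2 ⊢; exact h2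

-- ---- A's any-nest ↔ ∃ pvGood ----
lemma pvA_iff (spades hearts diamonds clubs : List Int) :
    ((pvPairs spades).any (fun s =>
       hearts.any (fun h =>
         diamonds.any (fun d =>
           clubs.any (fun c => pvCheck s.1 s.2 h d c)))) = true) ↔
    ∃ x y, pvGood spades hearts diamonds clubs x y := by
  simp only [List.any_eq_true]
  constructor
  · rintro ⟨⟨p1, p2⟩, hp, h, hh, d, hd, c, hc, hchk⟩
    rw [pvCheck_iff] at hchk
    obtain ⟨x, y, hxy, h3, h2⟩ := hchk
    have hall := pv_all_mem_pair hxy h3 h2 (by simp)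
    have hp1 : p1 = x ∨ p1 = y := hall p1 (by simp)
    have hp2 : p2 = x ∨ p2 = y := hall p2 (by simp)
    have hhm : h = x ∨ h = y := hall h (by simp)
    have hdm : d = x ∨ d = y := hall d (by simp)
    have hcm : c = x ∨ c = y := hall c (by simp)
    refine ⟨x, y, hxy, ?_⟩
    rcases hp1 with rfl | rfl <;> rcases hp2 with rfl | rfl <;>
      rcases hhm with rfl | rfl <;> rcases hdm with rfl | rfl <;> rcases hcm with rfl | rfl <;>
      simp [List.count_cons, hxy, Ne.symm hxy] at h3 h2 <;>
      first
        | omega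
        | exact Or.inl ⟨pvPairs_count_two hp, Or.inl ⟨hh, hd, hc⟩⟩
        | exact Or.inl ⟨pvPairs_count_two hp, Or.inr (Or.inl ⟨hh, hd, hc⟩)⟩
        | exact Or.inl ⟨pvPairs_count_two hp, Or.inr (Or.inr ⟨hh, hd, hc⟩)⟩
        | exact Or.inr (Or.inl ⟨(pvPairs_mem_both hp).1, (pvPairs_mem_both hp).2,
            Or.inl ⟨hh, hd, hc⟩⟩)
        | exact Or.inr (Or.inl ⟨(pvPairs_mem_both hp).1, (pvPairs_mem_both hp).2,
            Or.inr (Or.inl ⟨hh, hd, hc⟩)⟩)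
        | exact Or.inr (Or.inl ⟨(pvPairs_mem_both hp).1, (pvPairs_mem_both hp).2,
            Or.inr (Or.inr ⟨hh, hd, hc⟩)⟩)
        | exact Or.inr (Or.inl ⟨(pvPairs_mem_both hp).2, (pvPairs_mem_both hp).1,
            Or.inl ⟨hh, hd, hc⟩⟩)
        | exact Or.inr (Or.inl ⟨(pvPairs_mem_both hp).2, (pvPairs_mem_both hp).1,
            Or.inr (Or.inl ⟨hh, hd, hc⟩)⟩)
        | exact Or.inr (Or.inl ⟨(pvPairs_mem_both hp).2, (pvPairs_mem_both hp).1,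
            Or.inr (Or.inr ⟨hh, hd, hc⟩)⟩)
        | exact Or.inr (Or.inr ⟨pvPairs_count_two hp, hh, hd, hc⟩)
  · rintro ⟨x, y, hxy, hg | hg | hg⟩
    · obtain ⟨hsp, hsub⟩ := hg
      rcases hsub with ⟨hh, hd, hc⟩ | ⟨hh, hd, hc⟩ | ⟨hh, hd, hc⟩
      · exact ⟨(x, x), pvPairs_of_count_two hsp, x, hh, y, hd, y, hc, (pvCheck_iff _ _ _ _ _).2
          ⟨x, y, hxy, by simp [List.count_cons, hxy, Ne.symm hxy], by simp [List.count_cons, hxy, Ne.symm hxy]⟩⟩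
      · exact ⟨(x, x), pvPairs_of_count_two hsp, y, hh, x, hd, y, hc, (pvCheck_iff _ _ _ _ _).2
          ⟨x, y, hxy, by simp [List.count_cons, hxy, Ne.symm hxy], by simp [List.count_cons, hxy, Ne.symm hxy]⟩⟩
      · exact ⟨(x, x), pvPairs_of_count_two hsp, y, hh, y, hd, x, hc, (pvCheck_iff _ _ _ _ _).2
          ⟨x, y, hxy, by simp [List.count_cons, hxy, Ne.symm hxy], by simp [List.count_cons, hxy, Ne.symm hxy]⟩⟩
    · obtain ⟨hxs, hys, hsub⟩ := hg
      rcases pvPairs_of_mem_mem hxs hys hxy with hp | hp <;>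
        rcases hsub with ⟨hh, hd, hc⟩ | ⟨hh, hd, hc⟩ | ⟨hh, hd, hc⟩
      · exact ⟨(x, y), hp, y, hh, x, hd, x, hc, (pvCheck_iff _ _ _ _ _).2
          ⟨x, y, hxy, by simp [List.count_cons, hxy, Ne.symm hxy], by simp [List.count_cons, hxy, Ne.symm hxy]⟩⟩
      · exact ⟨(x, y), hp, x, hh, y, hd, x, hc, (pvCheck_iff _ _ _ _ _).2
          ⟨x, y, hxy, by simp [List.count_cons, hxy, Ne.symm hxy], by simp [List.count_cons, hxy, Ne.symm hxy]⟩⟩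
      · exact ⟨(x, y), hp, x, hh, x, hd, y, hc, (pvCheck_iff _ _ _ _ _).2
          ⟨x, y, hxy, by simp [List.count_cons, hxy, Ne.symm hxy], by simp [List.count_cons, hxy, Ne.symm hxy]⟩⟩
      · exact ⟨(y, x), hp, y, hh, x, hd, x, hc, (pvCheck_iff _ _ _ _ _).2
          ⟨x, y, hxy, by simp [List.count_cons, hxy, Ne.symm hxy], by simp [List.count_cons, hxy, Ne.symm hxy]⟩⟩
      · exact ⟨(y, x), hp, x, hh, y, hd, x, hc, (pvCheck_iff _ _ _ _ _).2
          ⟨x, y, hxy, by simp [List.count_cons, hxy, Ne.symm hxy], by simp [List.count_cons, hxy, Ne.symm hxy]⟩⟩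
      · exact ⟨(y, x), hp, x, hh, x, hd, y, hc, (pvCheck_iff _ _ _ _ _).2
          ⟨x, y, hxy, by simp [List.count_cons, hxy, Ne.symm hxy], by simp [List.count_cons, hxy, Ne.symm hxy]⟩⟩
    · obtain ⟨hsp, hh, hd, hc⟩ := hg
      exact ⟨(y, y), pvPairs_of_count_two hsp, x, hh, x, hd, x, hc, (pvCheck_iff _ _ _ _ _).2
        ⟨x, y, hxy, by simp [List.count_cons, hxy, Ne.symm hxy], by simp [List.count_cons, hxy, Ne.symm hxy]⟩⟩

-- membership in B's sp2 (ranks held at least twice in spades)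
lemma pv_filter_mem (spades : List Int) (a : Int) :
    (a ∈ (PySem.Set.ofList spades).filter (fun r => decide (2 ≤ spades.count r))) ↔
      2 ≤ spades.count a := by
  rw [List.mem_filter]
  constructor
  · rintro ⟨-, hp⟩; exact of_decide_eq_true hp
  · intro hp
    exact ⟨(PySem.Set.mem_ofList _ _).2 (List.count_pos_iff.1 (by omega)), decide_eq_true hp⟩

-- ---- B's inner test ↔ pvGood ----
lemma pvB_inner_iff (spades hearts diamonds clubs : List Int) (x y : Int) :
    ((if x == y then false
      else
        (PySem.Set.contains ((PySem.Set.ofList spades).filter (fun r => decide (2 ≤ spades.count r))) x &&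
          ((PySem.Set.contains (PySem.Set.ofList hearts) x && PySem.Set.contains (PySem.Set.ofList diamonds) y && PySem.Set.contains (PySem.Set.ofList clubs) y) ||
           (PySem.Set.contains (PySem.Set.ofList hearts) y && PySem.Set.contains (PySem.Set.ofList diamonds) x && PySem.Set.contains (PySem.Set.ofList clubs) y) ||
           (PySem.Set.contains (PySem.Set.ofList hearts) y && PySem.Set.contains (PySem.Set.ofList diamonds) y && PySem.Set.contains (PySem.Set.ofList clubs) x))) ||
        (PySem.Set.contains (PySem.Set.ofList spades) x && PySem.Set.contains (PySem.Set.ofList spades) y &&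
          ((PySem.Set.contains (PySem.Set.ofList hearts) y && PySem.Set.contains (PySem.Set.ofList diamonds) x && PySem.Set.contains (PySem.Set.ofList clubs) x) ||
           (PySem.Set.contains (PySem.Set.ofList hearts) x && PySem.Set.contains (PySem.Set.ofList diamonds) y && PySem.Set.contains (PySem.Set.ofList clubs) x) ||
           (PySem.Set.contains (PySem.Set.ofList hearts) x && PySem.Set.contains (PySem.Set.ofList diamonds) x && PySem.Set.contains (PySem.Set.ofList clubs) y))) ||
        (PySem.Set.contains ((PySem.Set.ofList spades).filter (fun r => decide (2 ≤ spades.count r))) y &&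
          PySem.Set.contains (PySem.Set.ofList hearts) x && PySem.Set.contains (PySem.Set.ofList diamonds) x && PySem.Set.contains (PySem.Set.ofList clubs) x)) = true) ↔
    pvGood spades hearts diamonds clubs x y := by
  by_cases hxy : x = y
  · simp [pvGood, hxy]
  · simp only [beq_iff_eq, hxy, if_false, Bool.or_eq_true, Bool.and_eq_true,
      PySem.Set.contains_iff, pv_filter_mem, PySem.Set.mem_ofList, pvGood, ne_eq,
      not_false_iff, true_and, and_assoc, or_assoc]

-- memberships forced by pvGood: both ranks occur in some suit
lemma pvGood_mem (spades hearts diamonds clubs : List Int) (x y : Int)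
    (hg : pvGood spades hearts diamonds clubs x y) :
    (x ∈ spades ∨ x ∈ hearts ∨ x ∈ diamonds ∨ x ∈ clubs) ∧
    (y ∈ spades ∨ y ∈ hearts ∨ y ∈ diamonds ∨ y ∈ clubs) := by
  have hcnt : ∀ a : Int, 2 ≤ spades.count a → a ∈ spades := fun a ha =>
    List.count_pos_iff.1 (by omega)
  obtain ⟨-, hg⟩ := hg
  constructor
  · rcases hg with ⟨hs, -⟩ | ⟨hx, -, -⟩ | ⟨-, hh, -, -⟩
    · exact Or.inl (hcnt x hs)
    · exact Or.inl hx
    · exact Or.inr (Or.inl hh)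
  · rcases hg with ⟨-, hsub⟩ | ⟨-, hy, -⟩ | ⟨hs, -, -, -⟩
    · rcases hsub with ⟨-, hd, -⟩ | ⟨hh, -, -⟩ | ⟨hh, -, -⟩
      · exact Or.inr (Or.inr (Or.inl hd))
      · exact Or.inr (Or.inl hh)
      · exact Or.inr (Or.inl hh)
    · exact Or.inl hy
    · exact Or.inl (hcnt y hs)

-- ---- B's any-nest ↔ ∃ pvGood ----
lemma pvB_iff (spades hearts diamonds clubs : List Int) :
    ((PySem.Set.union (PySem.Set.union (PySem.Set.union (PySem.Set.ofList spades) (PySem.Set.ofList hearts)) (PySem.Set.ofList diamonds)) (PySem.Set.ofList clubs)).any (fun x =>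
      (PySem.Set.union (PySem.Set.union (PySem.Set.union (PySem.Set.ofList spades) (PySem.Set.ofList hearts)) (PySem.Set.ofList diamonds)) (PySem.Set.ofList clubs)).any (fun y =>
       if x == y then false
       else
         (PySem.Set.contains ((PySem.Set.ofList spades).filter (fun r => decide (2 ≤ spades.count r))) x &&
           ((PySem.Set.contains (PySem.Set.ofList hearts) x && PySem.Set.contains (PySem.Set.ofList diamonds) y && PySem.Set.contains (PySem.Set.ofList clubs) y) ||
            (PySem.Set.contains (PySem.Set.ofList hearts) y && PySem.Set.contains (PySem.Set.ofList diamonds) x && PySem.Set.contains (PySem.Set.ofList clubs) y) ||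
            (PySem.Set.contains (PySem.Set.ofList hearts) y && PySem.Set.contains (PySem.Set.ofList diamonds) y && PySem.Set.contains (PySem.Set.ofList clubs) x))) ||
         (PySem.Set.contains (PySem.Set.ofList spades) x && PySem.Set.contains (PySem.Set.ofList spades) y &&
           ((PySem.Set.contains (PySem.Set.ofList hearts) y && PySem.Set.contains (PySem.Set.ofList diamonds) x && PySem.Set.contains (PySem.Set.ofList clubs) x) ||
            (PySem.Set.contains (PySem.Set.ofList hearts) x && PySem.Set.contains (PySem.Set.ofList diamonds) y && PySem.Set.contains (PySem.Set.ofList clubs) x) ||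
            (PySem.Set.contains (PySem.Set.ofList hearts) x && PySem.Set.contains (PySem.Set.ofList diamonds) x && PySem.Set.contains (PySem.Set.ofList clubs) y))) ||
         (PySem.Set.contains ((PySem.Set.ofList spades).filter (fun r => decide (2 ≤ spades.count r))) y &&
           PySem.Set.contains (PySem.Set.ofList hearts) x && PySem.Set.contains (PySem.Set.ofList diamonds) x && PySem.Set.contains (PySem.Set.ofList clubs) x))) = true) ↔
    ∃ x y, pvGood spades hearts diamonds clubs x y := by
  simp only [List.any_eq_true]
  constructor
  · rintro ⟨x, -, y, -, hinner⟩
    exact ⟨x, y, (pvB_inner_iff spades hearts diamonds clubs x y).1 hinner⟩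
  · rintro ⟨x, y, hg⟩
    obtain ⟨hxm, hym⟩ := pvGood_mem spades hearts diamonds clubs x y hg
    refine ⟨x, ?_, y, ?_, (pvB_inner_iff spades hearts diamonds clubs x y).2 hg⟩ <;>
      simp only [PySem.Set.mem_union, PySem.Set.mem_ofList] <;> tauto

-- ===== VERDICT (by name: the statement is the Claim_ definition above) =====
theorem hasFull_spec : Claim_equal_hasFull := by
  intro spades hearts diamonds clubs _
  unfold Spec_hasFull hasFull hasFull_alt
  have hA := pvA_iff spades hearts diamonds clubs
  have hB := pvB_iff spades hearts diamonds clubs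
  by_cases hG : ∃ x y, pvGood spades hearts diamonds clubs x y
  · rw [if_pos (hA.2 hG), if_pos (hB.2 hG)]
  · rw [if_neg (fun hh => hG (hA.1 hh)), if_neg (fun hh => hG (hB.1 hh))]
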